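-- pv_equiv track=rewrite | github.com/meisn/advent-of-code-2021 | day7/day7.py | calc_delta
-- ===== SOURCE A (Python) =====
-- from collections import defaultdict
-- from itertools import product
--
-- def calc_delta(inputlist: list, exponential=False) -> dict:
--     """Refined solution for both answers. Surely not the most efficient..."""
--     retval = defaultdict(int)
--     checks = set(inputlist)
--     for checknumber, number in product(checks, inputlist):
--         delta = abs(checknumber - number)
--         if exponential:
--             delta = sum(range(delta+1))
--         retval[checknumber] += delta
--     return retval
-- ===== SOURCE B (Python) =====
-- def calc_delta(inputlist: list, exponential=False) -> dict:
--     """Count duplicates once, then score each distinct position against the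
--     distinct values weighted by multiplicity, with a closed-form triangular
--     cost instead of sum(range(...))."""
--     counts = {}
--     for n in inputlist:
--         counts[n] = counts.get(n, 0) + 1
--     retval = {}
--     for c in counts:
--         total = 0
--         for v, cnt in counts.items():
--             d = abs(c - v)
--             if exponential:
--                 d = d * (d + 1) // 2
--             total += cnt * d
--         retval[c] = total
--     return retval
-- ===== Notes on version B (the rewrite author's own statement) =====
-- stated objective: alternative
-- what changed: B builds a frequency counter once and scores each distinct candidate against the distinct values weighted by multiplicity, replacing A's scan of the whole input list per candidate and A's per-pair sum(range(delta+1)) loop with the closed-form triangular number d*(d+1)//2.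
import Mathlib
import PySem

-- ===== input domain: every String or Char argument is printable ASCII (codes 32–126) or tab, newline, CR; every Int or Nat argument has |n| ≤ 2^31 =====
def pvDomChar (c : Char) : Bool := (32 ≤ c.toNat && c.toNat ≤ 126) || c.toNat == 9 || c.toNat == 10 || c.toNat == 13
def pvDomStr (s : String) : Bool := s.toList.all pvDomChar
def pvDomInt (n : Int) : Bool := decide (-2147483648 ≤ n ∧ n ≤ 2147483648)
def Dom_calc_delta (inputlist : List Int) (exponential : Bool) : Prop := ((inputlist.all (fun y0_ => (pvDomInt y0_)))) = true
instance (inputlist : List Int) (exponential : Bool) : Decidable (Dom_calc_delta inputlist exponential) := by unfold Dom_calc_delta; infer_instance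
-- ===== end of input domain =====

-- B replaces A's per-candidate scan of the whole input list by a frequency counter over the
-- distinct values and A's per-pair sum(range(delta+1)) loop by the closed form d*(d+1)//2.
-- A returns a dict; its key order here follows PySem.Set.ofList (first occurrences), the
-- result being order-insensitive as a dict.

-- ===== PORT A =====
-- sum(range(delta+1)): CPython iterates the lazy range adding each value; ported by hand
-- as the same accumulating loop (exact; PySem has no lazy-range sum)
def pySumRangeGo : Nat → Int → Int → Int
  | 0, _, acc => acc
  | k+1, i, acc => pySumRangeGo k (i+1) (acc + i)
def pySumRange (stop : Int) : Int := pySumRangeGo stop.toNat 0 0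

def calc_delta (inputlist : List Int) (exponential : Bool) : List (Int × Int) :=
  let checks : PySem.Set Int := PySem.Set.ofList inputlist
  let pairs : List (Int × Int) := checks.flatMap (fun c => inputlist.map (fun n => (c, n)))
  let retval : PySem.Dict Int Int :=
    pairs.foldl (fun d p =>
      let delta := |p.1 - p.2|
      let delta := if exponential then pySumRange (delta + 1) else delta
      d.modify p.1 0 (· + delta)) PySem.Dict.empty
  retval.items

-- ===== PORT B =====
def calc_delta_alt (inputlist : List Int) (exponential : Bool) : List (Int × Int) :=
  let counts : PySem.Dict Int Int :=
    inputlist.foldl (fun d n => d.insert n (d.getD n 0 + 1)) PySem.Dict.empty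
  let retval : PySem.Dict Int Int :=
    counts.keys.foldl (fun r c =>
      r.insert c (counts.items.foldl (fun total p =>
        total + p.2 * (let d := |c - p.1|;
          if exponential then PySem.Int.floordiv (d * (d + 1)) 2 else d)) 0)) PySem.Dict.empty
  retval.items

-- ===== PRECONDITION & SPEC =====
def Spec_calc_delta (inputlist : List Int) (exponential : Bool) (out : List (Int × Int)) : Prop := out = calc_delta_alt inputlist exponential
instance (inputlist : List Int) (exponential : Bool) (out : List (Int × Int)) : Decidable (Spec_calc_delta inputlist exponential out) := by unfold Spec_calc_delta; infer_instance

-- ===== CLAIM (what is proved, stated in full; the proofs are below) =====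
def Claim_equal_calc_delta : Prop := ∀ (inputlist : List Int) (exponential : Bool), Dom_calc_delta inputlist exponential → Spec_calc_delta inputlist exponential (calc_delta inputlist exponential)

-- ===== LEMMAS AND PROOFS =====

-- A's per-pair cost and B's per-pair cost
def pvCostA (e : Bool) (d : Int) : Int := if e then pySumRange (d + 1) else d
def pvCostB (e : Bool) (d : Int) : Int := if e then PySem.Int.floordiv (d * (d + 1)) 2 else d

theorem pv_sumRangeGo_eq (k : Nat) : ∀ (i acc : Int),
    2 * pySumRangeGo k i acc = 2 * acc + (k : Int) * (2 * i + (k : Int) - 1) := by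
  induction k with
  | zero => intro i acc; simp [pySumRangeGo]
  | succ n ih =>
    intro i acc
    rw [pySumRangeGo, ih]
    push_cast
    ring

theorem pv_cost_eq (e : Bool) (d : Int) (hd : 0 ≤ d) : pvCostA e d = pvCostB e d := by
  cases e with
  | false => rfl
  | true =>
    simp only [pvCostA, pvCostB, if_true]
    unfold pySumRange
    have h := pv_sumRangeGo_eq (d + 1).toNat 0 0
    have hto : (((d + 1).toNat : Int)) = d + 1 := by omega
    rw [hto] at h
    have h2 : d * (d + 1) = 2 * pySumRangeGo (d + 1).toNat 0 0 := by
      rw [h]; ring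
    rw [h2]
    simp [PySem.Int.floordiv]

-- getD of a defaultdict-accumulation fold: sum of g over the pairs with this key
theorem pv_getD_fold_modify (g : Int × Int → Int) (L : List (Int × Int))
    (d : PySem.Dict Int Int) (k : Int) :
    (L.foldl (fun d p => d.modify p.1 0 (· + g p)) d).getD k 0
      = d.getD k 0 + ((L.filter (fun p => p.1 == k)).map g).sum := by
  induction L generalizing d with
  | nil => simp
  | cons p t ih =>
    simp only [List.foldl_cons, List.filter_cons]
    rw [ih]
    by_cases hk : p.1 = k
    · subst hk
      simp [PySem.Dict.getD_modify_self]
      ring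
    · have : (p.1 == k) = false := by simp [hk]
      rw [this]
      simp only [Bool.false_eq_true, if_false]
      rw [PySem.Dict.getD_modify]
      rw [if_neg (fun h => hk h.symm)]

-- the product's pairs with key c, when c is not among the candidates
theorem pv_filter_product_not_mem (s l : List Int) (c : Int) (hc : c ∉ s) :
    ((s.flatMap (fun c' => l.map (fun n => (c', n)))).filter (fun p => p.1 == c)) = [] := by
  induction s with
  | nil => simp
  | cons a t ih =>
    simp only [List.flatMap_cons, List.filter_append]
    have ha : a ≠ c := fun h => hc (h ▸ List.mem_cons_self)
    have h1 : ((l.map (fun n => (a, n))).filter (fun p => p.1 == c)) = [] := by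
      simp [List.filter_map, Function.comp, ha]
    rw [h1, ih (fun h => hc (List.mem_cons_of_mem _ h))]
    simp

-- the product's pairs with key c, for c a candidate: exactly c's block
theorem pv_filter_product (s l : List Int) (c : Int) (hs : s.Nodup) (hc : c ∈ s) :
    ((s.flatMap (fun c' => l.map (fun n => (c', n)))).filter (fun p => p.1 == c))
      = l.map (fun n => (c, n)) := by
  induction s with
  | nil => simp at hc
  | cons a t ih =>
    simp only [List.flatMap_cons, List.filter_append]
    rcases List.mem_cons.mp hc with h | h
    · subst h
      have hct : c ∉ t := (List.nodup_cons.mp hs).1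
      rw [pv_filter_product_not_mem t l c hct]
      simp [List.filter_map, Function.comp_def]
    · have ha : a ≠ c := fun he => (List.nodup_cons.mp hs).1 (he ▸ h)
      have h1 : ((l.map (fun n => (a, n))).filter (fun p => p.1 == c)) = [] := by
        simp [List.filter_map, Function.comp, ha]
      rw [h1, ih (List.nodup_cons.mp hs).2 h]
      simp

-- a constant block only adds its one element to a set
theorem pv_update_const (l : List Int) (s : PySem.Set Int) (a : Int) (ha : a ∈ s) :
    PySem.Set.update s (l.map (fun _ => a)) = s := by
  induction l generalizing s with
  | nil => simp [PySem.Set.update_nil]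
  | cons x t ih =>
    simp only [List.map_cons, PySem.Set.update_cons]
    rw [PySem.Set.add_of_mem ha]
    exact ih s ha

-- set of the keys of the product = the (nodup) candidate list, when the inner list is nonempty
theorem pv_ofList_product_keys (s l : List Int) (hs : s.Nodup) (hl : l ≠ []) :
    PySem.Set.ofList ((s.flatMap (fun c => l.map (fun n => (c, n)))).map (·.1)) = s := by
  induction s using List.reverseRecOn with
  | nil => simp
  | append_singleton t a ih =>
    rw [List.flatMap_append, List.map_append, PySem.Set.ofList_append]
    rw [ih (List.Nodup.of_append_left hs)]
    simp only [List.flatMap_cons, List.flatMap_nil, List.append_nil, List.map_map]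
    have hmap2 : ((fun x => x.1) ∘ (fun n => (a, n))) = (fun (_ : Int) => a) := rfl
    rw [hmap2]
    rcases l with _ | ⟨n0, t0⟩
    · exact absurd rfl hl
    · simp only [List.map_cons, PySem.Set.update_cons]
      have hna : a ∉ t := by
        have h' := hs
        simp only [List.nodup_append] at h'
        intro hmem
        exact h'.2.2 a hmem a (by simp) rfl
      rw [PySem.Set.add_of_not_mem hna]
      exact pv_update_const t0 (t ++ [a]) a (by simp)

-- sum of (indicator of x) * h over a nodup list containing x
theorem pv_sum_single (s : List Int) (x : Int) (h : Int → Int) (hs : s.Nodup) (hx : x ∈ s) :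
    (s.map (fun v => (if v = x then (1:Int) else 0) * h v)).sum = h x := by
  induction s with
  | nil => simp at hx
  | cons a t ih =>
    simp only [List.map_cons, List.sum_cons]
    by_cases he : x = a
    · subst he
      have hat : x ∉ t := (List.nodup_cons.mp hs).1
      have hz : (t.map (fun v => if v = x then h v else 0)).sum = 0 := by
        rw [List.sum_eq_zero]
        intro y hy
        rcases List.mem_map.mp hy with ⟨v, hv, rfl⟩
        have hvx : v ≠ x := fun hva => hat (hva ▸ hv)
        simp [hvx]
      simp [hz]
    · have hxt : x ∈ t := by
        rcases List.mem_cons.mp hx with h' | h'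
        · exact absurd h' he
        · exact h'
      rw [ih (List.nodup_cons.mp hs).2 hxt]
      have hax : a ≠ x := fun h' => he h'.symm
      simp [hax]

-- the counting identity: a sum over the list = the count-weighted sum over its distinct values
theorem pv_sum_counter (h : Int → Int) (l : List Int) :
    (l.map h).sum = ((PySem.Set.ofList l).map (fun v => (l.count v : Int) * h v)).sum := by
  induction l using List.reverseRecOn with
  | nil => simp
  | append_singleton t x ih =>
    rw [List.map_append, List.sum_append, PySem.Set.ofList_append_singleton]
    simp only [List.map_singleton, List.sum_singleton]
    by_cases hx : x ∈ PySem.Set.ofList t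
    · rw [PySem.Set.add_of_mem hx]
      have hcount : ∀ v : Int, ((t ++ [x]).count v : Int)
          = (t.count v : Int) + (if v = x then 1 else 0) := by
        intro v
        rw [List.count_append]
        by_cases hv : v = x
        · subst hv; simp
        · have hz : List.count v [x] = 0 :=
            List.count_eq_zero_of_not_mem (by simp [hv])
          rw [hz, if_neg hv]
          simp
      have : ((PySem.Set.ofList t).map (fun v => ((t ++ [x]).count v : Int) * h v)).sum
          = ((PySem.Set.ofList t).map (fun v => (t.count v : Int) * h v)).sum
            + ((PySem.Set.ofList t).map (fun v => (if v = x then (1:Int) else 0) * h v)).sum := by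
        rw [← List.sum_map_add]
        refine congrArg List.sum ?_
        apply List.map_congr_left
        intro v _
        rw [hcount v]; ring
      rw [this, pv_sum_single _ x h (PySem.Set.nodup_ofList t) hx, ← ih]
    · rw [PySem.Set.add_of_not_mem hx]
      rw [List.map_append, List.sum_append]
      simp only [List.map_singleton, List.sum_singleton]
      have hxl : x ∉ t := fun hm => hx ((PySem.Set.mem_ofList _ _).mpr hm)
      have h1 : ((t ++ [x]).count x : Int) = 1 := by
        rw [List.count_append]
        simp [List.count_eq_zero_of_not_mem hxl]
      have h2 : ((PySem.Set.ofList t).map (fun v => ((t ++ [x]).count v : Int) * h v))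
          = ((PySem.Set.ofList t).map (fun v => (t.count v : Int) * h v)) := by
        apply List.map_congr_left
        intro v hv
        have hvx : v ≠ x := fun he => hxl ((PySem.Set.mem_ofList _ _).mp (he ▸ hv))
        have hz : List.count v [x] = 0 :=
          List.count_eq_zero_of_not_mem (by simp [hvx])
        rw [List.count_append, hz]
        simp
      rw [h1, h2, ← ih]
      ring_nf

-- A's dict items, in closed form
theorem pv_calc_delta_eq (inputlist : List Int) (exponential : Bool) :
    calc_delta inputlist exponential
      = (PySem.Set.ofList inputlist).map
          (fun c => (c, (inputlist.map (fun n => pvCostA exponential |c - n|)).sum)) := by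
  rcases heq : inputlist with _ | ⟨n0, t0⟩
  · rfl
  · rw [← heq]
    have hl : inputlist ≠ [] := by rw [heq]; simp
    unfold calc_delta
    simp only []
    set s := PySem.Set.ofList inputlist with hs
    set L := s.flatMap (fun c => inputlist.map (fun n => (c, n))) with hL
    set g : Int × Int → Int := fun p => pvCostA exponential |p.1 - p.2| with hg
    have hstep : (fun (d : PySem.Dict Int Int) (p : Int × Int) =>
        let delta := |p.1 - p.2|
        let delta := if exponential then pySumRange (delta + 1) else delta
        d.modify p.1 0 (· + delta))
        = fun d p => d.modify p.1 0 (· + g p) := by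
      funext d p
      simp [hg, pvCostA]
    rw [hstep]
    set D := L.foldl (fun d p => d.modify p.1 0 (· + g p)) PySem.Dict.empty with hD
    have hsnd : s.Nodup := PySem.Set.nodup_ofList inputlist
    have hkeys : D.keys = s := by
      rw [hD]
      rw [PySem.Dict.keys_foldl_modify_key (key := fun p : Int × Int => p.1)]
      rw [PySem.Dict.keys_empty, PySem.Set.update_nil_left, hL]
      exact pv_ofList_product_keys s inputlist hsnd hl
    have hnd : D.keys.Nodup := hkeys ▸ hsnd
    rw [PySem.Dict.items_eq_map_keys D hnd 0, hkeys]
    apply List.map_congr_left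
    intro c hc
    have hgetD : D.getD c 0 = ((L.filter (fun p => p.1 == c)).map g).sum := by
      rw [hD, pv_getD_fold_modify]
      simp
    rw [hgetD, hL, pv_filter_product s inputlist c hsnd hc, List.map_map]
    rfl

-- B's dict items, in closed form
theorem pv_calc_delta_alt_eq (inputlist : List Int) (exponential : Bool) :
    calc_delta_alt inputlist exponential
      = (PySem.Set.ofList inputlist).map
          (fun c => (c, ((PySem.Set.ofList inputlist).map
            (fun v => (inputlist.count v : Int) * pvCostB exponential |c - v|)).sum)) := by
  unfold calc_delta_alt
  simp only []
  set counts := inputlist.foldl (fun d n => d.insert n (d.getD n 0 + 1))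
      (PySem.Dict.empty : PySem.Dict Int Int) with hcounts
  have hkeys : counts.keys = PySem.Set.ofList inputlist := by
    rw [hcounts, PySem.Dict.keys_foldl_insert, PySem.Dict.keys_empty,
      PySem.Set.update_nil_left]
  have hnd : counts.keys.Nodup := hkeys ▸ PySem.Set.nodup_ofList inputlist
  have hgetD : ∀ v : Int, counts.getD v 0 = (inputlist.count v : Int) := by
    intro v
    rw [hcounts, PySem.Dict.getD_foldl_insert_add_one]
    simp
  have hitems : counts.items
      = (PySem.Set.ofList inputlist).map (fun v => (v, (inputlist.count v : Int))) := by
    rw [PySem.Dict.items_eq_map_keys counts hnd 0, hkeys]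
    apply List.map_congr_left
    intro v _
    rw [hgetD v]
  have hfresh : ∀ a ∈ counts.keys,
      (PySem.Dict.empty : PySem.Dict Int Int).contains a = false := by
    intro a _; simp
  have hins := PySem.Dict.items_foldl_insert_fresh (l := counts.keys) (k := fun c : Int => c)
    (v := fun c => List.foldl (fun total p =>
      total + p.2 * if exponential = true then
        PySem.Int.floordiv (|c - p.1| * (|c - p.1| + 1)) 2 else |c - p.1|) 0 counts.items)
    (d := PySem.Dict.empty) hfresh (by simpa using hnd)
  rw [hins]
  simp only [PySem.Dict.empty, PySem.Dict.items, List.nil_append]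
  rw [hkeys]
  apply List.map_congr_left
  intro c _
  congr 1
  rw [hitems]
  rw [PySem.List.foldl_add (g := fun p : Int × Int =>
    p.2 * (let d := |c - p.1|;
      if exponential then PySem.Int.floordiv (d * (d + 1)) 2 else d))]
  rw [List.map_map]
  simp only [Int.zero_add]
  apply congrArg
  apply List.map_congr_left
  intro v _
  rfl

-- ===== VERDICT (by name: the statement is the Claim_ definition above) =====
theorem calc_delta_spec : Claim_equal_calc_delta := by
  intro inputlist exponential _
  unfold Spec_calc_delta
  rw [pv_calc_delta_eq, pv_calc_delta_alt_eq]
  apply List.map_congr_left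
  intro c _
  congr 1
  rw [pv_sum_counter (fun n => pvCostA exponential |c - n|) inputlist]
  apply congrArg
  apply List.map_congr_left
  intro v _
  rw [pv_cost_eq exponential |c - v| (abs_nonneg _)]
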